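-- pv_equiv track=rewrite | github.com/wattaihei/ProgrammingContest | Codeforces/CR657/probC.py | solve
-- ===== SOURCE A (Python) =====
-- from bisect import bisect_left
--
-- def solve(N, M, AB):
--     As = []
--     for a, _ in AB:
--         As.append(a)
--
--     As.sort()
--     sA = [0]
--     for a in As:
--         sA.append(a+sA[-1])
--
--     ans = sA[-1] - sA[-1-min(M,N)]
--
--     for a, b in AB:
--         ind = bisect_left(As, b)
--         countA = M - ind
--         if a >= b:
--             countA = min(countA, N)
--             score = sA[-1] - sA[-1-countA] + (N-countA)*b
--         else:
--             countA = min(countA, N-1)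
--             score = a + sA[-1] - sA[-1-countA] + (N-countA-1)*b
--         ans = max(ans, score)
--     return ans
-- ===== SOURCE B (Python) =====
-- def solve(N, M, AB):
--     As = sorted(a for a, _ in AB)
--     sA = [0]
--     for a in As:
--         sA.append(a + sA[-1])
--     ans = sA[-1] - sA[-1 - min(M, N)]
--     ind = 0
--     for a, b in sorted(AB, key=lambda p: p[1]):
--         while ind < len(As) and As[ind] < b:
--             ind += 1
--         countA = M - ind
--         if a >= b:
--             countA = min(countA, N)
--             score = sA[-1] - sA[-1-countA] + (N-countA)*b
--         else:
--             countA = min(countA, N-1)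
--             score = a + sA[-1] - sA[-1-countA] + (N-countA-1)*b
--         ans = max(ans, score)
--     return ans
-- ===== Notes on version B (the rewrite author's own statement) =====
-- stated objective: alternative
-- what changed: Instead of a binary search (bisect_left) into sorted As for every pair, B sorts the pairs by b once and sweeps a single monotone pointer through sorted As, so each As element is passed at most once across the whole query loop; the running max is taken in b-sorted order, which is sound because max is commutative.
import Mathlib
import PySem

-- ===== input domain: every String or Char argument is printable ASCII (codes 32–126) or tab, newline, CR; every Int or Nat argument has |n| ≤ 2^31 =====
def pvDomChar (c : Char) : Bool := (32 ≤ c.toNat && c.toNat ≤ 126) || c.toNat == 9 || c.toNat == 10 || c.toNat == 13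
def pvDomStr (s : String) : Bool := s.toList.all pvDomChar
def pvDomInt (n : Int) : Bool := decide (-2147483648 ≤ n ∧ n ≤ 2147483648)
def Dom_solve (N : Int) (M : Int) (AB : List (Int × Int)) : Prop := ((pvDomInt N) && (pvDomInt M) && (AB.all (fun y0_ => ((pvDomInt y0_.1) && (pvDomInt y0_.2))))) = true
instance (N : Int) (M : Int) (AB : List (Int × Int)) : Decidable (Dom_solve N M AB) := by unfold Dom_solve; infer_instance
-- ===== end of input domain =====

-- B replaces the per-pair bisect_left with one sweep of a pointer over the sorted As,
-- processing the pairs in ascending order of b (objective: alternative decomposition).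

-- ===== PORT A =====
-- helpers shared by the two ports: both Pythons build the sorted list As and the
-- prefix-sum list sA, and take the same no-query baseline, with identical code.
-- sA[-1] / sA[-1-k] are pyGetD with default 0: under Pre_solve every such index is
-- in range, so the default is never used (out of range = Python IndexError, excluded).
def buildSA (As : List Int) : List Int :=
  As.foldl (fun s a => s ++ [a + PySem.List.pyGetD s (-1) 0]) [(0 : Int)]

def baseAns (N : Int) (M : Int) (sA : List Int) : Int :=
  PySem.List.pyGetD sA (-1) 0 - PySem.List.pyGetD sA (-1 - min M N) 0

-- A's per-pair loop: ind = bisect_left(As, b) each time (PySem.List.bisectLeft is bisect_left)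
def loopA (N : Int) (M : Int) (sA : List Int) (As : List Int) (ans0 : Int)
    (AB : List (Int × Int)) : Int :=
  AB.foldl (fun ans p =>
    let countA := M - (PySem.List.bisectLeft As p.2 : Int)
    let score :=
      if p.1 ≥ p.2 then
        let cA := min countA N
        PySem.List.pyGetD sA (-1) 0 - PySem.List.pyGetD sA (-1 - cA) 0 + (N - cA) * p.2
      else
        let cA := min countA (N - 1)
        p.1 + PySem.List.pyGetD sA (-1) 0 - PySem.List.pyGetD sA (-1 - cA) 0 + (N - cA - 1) * p.2
    max ans score) ans0

def solve (N : Int) (M : Int) (AB : List (Int × Int)) : Int :=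
  -- As = []; for a,_ in AB: As.append(a); As.sort()
  let As := PySem.List.sorted (AB.foldl (fun acc p => acc ++ [p.1]) ([] : List Int)) (fun x => x)
  let sA := buildSA As
  loopA N M sA As (baseAns N M sA) AB

-- ===== PORT B =====
-- the `while ind < len(As) and As[ind] < b: ind += 1` pointer advance; the not-yet-passed
-- suffix of As is carried alongside ind, so As[ind] is the head of `rest`.
def advanceB : List Int → Nat → Int → List Int × Nat
  | [], ind, _ => ([], ind)
  | x :: xs, ind, b => if x < b then advanceB xs (ind + 1) b else (x :: xs, ind)

-- B's single sweep over the pairs sorted by b, threading (rest, ind) through the loop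
def sweepB (N : Int) (M : Int) (sA : List Int) (qs : List (Int × Int))
    (rest : List Int) (ind : Nat) (ans : Int) : Int :=
  match qs with
  | [] => ans
  | p :: qs' =>
    let st := advanceB rest ind p.2
    let countA := M - (st.2 : Int)
    let score :=
      if p.1 ≥ p.2 then
        let cA := min countA N
        PySem.List.pyGetD sA (-1) 0 - PySem.List.pyGetD sA (-1 - cA) 0 + (N - cA) * p.2
      else
        let cA := min countA (N - 1)
        p.1 + PySem.List.pyGetD sA (-1) 0 - PySem.List.pyGetD sA (-1 - cA) 0 + (N - cA - 1) * p.2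
    sweepB N M sA qs' st.1 st.2 (max ans score)

def solve_alt (N : Int) (M : Int) (AB : List (Int × Int)) : Int :=
  let As := PySem.List.sorted (AB.map Prod.fst) (fun x => x)   -- As = sorted(a for a,_ in AB)
  let sA := buildSA As
  sweepB N M sA (PySem.List.sorted AB (fun p => p.2)) As 0 (baseAns N M sA)

-- ===== PRECONDITION & SPEC =====
-- Pre_solve states exactly that every prefix-sum index sA[-1-k] the Python takes is in
-- range (len(sA) = len(AB)+1): the baseline's k = min(M,N) and, for each pair, the capped
-- count (whose bisect index is the number of a-values below b). Outside Pre_solve the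
-- Python raises IndexError; Pre_solve excludes nothing on which A returns.
def pvInRange (L : Int) (m : Int) : Prop := -1 - L ≤ m ∧ m ≤ L

-- the capped count the pair (a, b) indexes sA with (bisect_left on sorted As returns
-- the number of elements of As smaller than b, a plain count over the input)
def pvCap (N : Int) (M : Int) (AB : List (Int × Int)) (p : Int × Int) : Int :=
  let c := M - ((AB.filter (fun q => q.1 < p.2)).length : Int)
  if p.1 ≥ p.2 then min c N else min c (N - 1)

def Pre_solve (N : Int) (M : Int) (AB : List (Int × Int)) : Prop :=
  pvInRange AB.length (min M N) ∧ ∀ p ∈ AB, pvInRange AB.length (pvCap N M AB p)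
instance (N : Int) (M : Int) (AB : List (Int × Int)) : Decidable (Pre_solve N M AB) := by
  unfold Pre_solve pvInRange pvCap; infer_instance

def pvWitness_solve : Int × Int × (List (Int × Int)) := (2, 2, [(1, 2), (3, 1)])

def Spec_solve (N : Int) (M : Int) (AB : List (Int × Int)) (out : Int) : Prop := out = solve_alt N M AB
instance (N : Int) (M : Int) (AB : List (Int × Int)) (out : Int) : Decidable (Spec_solve N M AB out) := by unfold Spec_solve; infer_instance

-- ===== CLAIM (what is proved, stated in full; the proofs are below) =====
def Claim_equal_solve : Prop := ∀ (N : Int) (M : Int) (AB : List (Int × Int)), Dom_solve N M AB → Pre_solve N M AB → Spec_solve N M AB (solve N M AB)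

-- ===== LEMMAS AND PROOFS =====

-- the per-pair score both programs compute, with the count expressed via bisect_left
def scoreF (N : Int) (M : Int) (sA : List Int) (As : List Int) (p : Int × Int) : Int :=
  let countA := M - (PySem.List.bisectLeft As p.2 : Int)
  if p.1 ≥ p.2 then
    let cA := min countA N
    PySem.List.pyGetD sA (-1) 0 - PySem.List.pyGetD sA (-1 - cA) 0 + (N - cA) * p.2
  else
    let cA := min countA (N - 1)
    p.1 + PySem.List.pyGetD sA (-1) 0 - PySem.List.pyGetD sA (-1 - cA) 0 + (N - cA - 1) * p.2

theorem loopA_eq_foldl_scoreF (N M : Int) (sA As : List Int) (ans0 : Int)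
    (AB : List (Int × Int)) :
    loopA N M sA As ans0 AB = AB.foldl (fun ans p => max ans (scoreF N M sA As p)) ans0 := rfl

theorem bisectLeft_mono (As : List Int) (hs : As.Pairwise (· ≤ ·)) {b b' : Int} (h : b ≤ b') :
    PySem.List.bisectLeft As b ≤ PySem.List.bisectLeft As b' := by
  obtain ⟨hc_le, hlt, hge⟩ := PySem.List.bisectLeft_spec As b hs
  obtain ⟨hc'_le, hlt', hge'⟩ := PySem.List.bisectLeft_spec As b' hs
  by_contra hcon
  rw [not_le] at hcon
  have hlen : PySem.List.bisectLeft As b' < As.length := lt_of_lt_of_le hcon hc_le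
  have h1 := hlt _ hlen hcon
  have h2 := hge' _ hlen le_rfl
  omega

theorem advanceB_eq (As : List Int) (hs : As.Pairwise (· ≤ ·)) (b : Int) :
    ∀ (rest : List Int) (ind : Nat), rest = As.drop ind →
      ind ≤ PySem.List.bisectLeft As b →
      advanceB rest ind b = (As.drop (PySem.List.bisectLeft As b), PySem.List.bisectLeft As b)
  | [], ind, hrest, hind => by
    obtain ⟨hc_le, hlt, hge⟩ := PySem.List.bisectLeft_spec As b hs
    have hlen : As.length ≤ ind := by
      by_contra hcon
      rw [not_le] at hcon
      have := List.drop_eq_nil_iff.mp hrest.symm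
      omega
    have heq : ind = PySem.List.bisectLeft As b := by omega
    simp [advanceB, ← heq, ← hrest]
  | x :: xs, ind, hrest, hind => by
    obtain ⟨hc_le, hlt, hge⟩ := PySem.List.bisectLeft_spec As b hs
    have hlen : ind < As.length := by
      by_contra hcon
      rw [not_lt] at hcon
      have h0 : As.drop ind = [] := List.drop_eq_nil_iff.mpr (by omega)
      rw [h0] at hrest; simp at hrest
    have hd : As.drop ind = x :: xs := hrest.symm
    have hx : x = As[ind] := by
      have h0 : (As.drop ind)[0]'(by simp [hd]) = x := by simp [hd]
      simpa using h0.symm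
    by_cases hic : ind < PySem.List.bisectLeft As b
    · have hxb : x < b := by rw [hx]; exact hlt ind hlen hic
      have hxs : xs = As.drop (ind + 1) := by
        rw [← List.tail_drop, hd]; rfl
      rw [advanceB, if_pos hxb]
      exact advanceB_eq As hs b xs (ind + 1) hxs (by omega)
    · have heq : ind = PySem.List.bisectLeft As b := by omega
      have hxb : ¬ x < b := by
        rw [hx]; exact not_lt.mpr (hge ind hlen (by omega))
      rw [advanceB, if_neg hxb, ← heq, hd]

theorem sweepB_eq (N M : Int) (sA As : List Int) (hs : As.Pairwise (· ≤ ·)) :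
    ∀ (qs : List (Int × Int)) (ind : Nat) (ans : Int),
      qs.Pairwise (fun p q => p.2 ≤ q.2) →
      (∀ q ∈ qs, ind ≤ PySem.List.bisectLeft As q.2) →
      sweepB N M sA qs (As.drop ind) ind ans
        = qs.foldl (fun ans p => max ans (scoreF N M sA As p)) ans
  | [], ind, ans, _, _ => rfl
  | p :: qs', ind, ans, hpw, hle => by
    have hadv := advanceB_eq As hs p.2 (As.drop ind) ind rfl (hle p (List.mem_cons_self ..))
    have hrec := sweepB_eq N M sA As hs qs' (PySem.List.bisectLeft As p.2)
      (max ans (scoreF N M sA As p))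
      (List.Pairwise.of_cons hpw)
      (fun q hq => bisectLeft_mono As hs ((List.pairwise_cons.mp hpw).1 q hq))
    rw [sweepB, hadv]
    exact hrec

theorem solve_eq_solve_alt (N M : Int) (AB : List (Int × Int)) :
    solve N M AB = solve_alt N M AB := by
  unfold solve solve_alt
  rw [PySem.List.foldl_append_singleton_eq_map, List.nil_append]
  have hsAs : (PySem.List.sorted (AB.map Prod.fst) (fun x => x)).Pairwise (· ≤ ·) := by
    simpa using PySem.List.sorted_pairwise (AB.map Prod.fst) (fun x => x)
  have hqs : (PySem.List.sorted AB (fun p => p.2)).Pairwise (fun p q => p.2 ≤ q.2) :=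
    PySem.List.sorted_pairwise AB (fun p => p.2)
  have hb := sweepB_eq N M
    (buildSA (PySem.List.sorted (AB.map Prod.fst) (fun x => x)))
    (PySem.List.sorted (AB.map Prod.fst) (fun x => x)) hsAs
    (PySem.List.sorted AB (fun p => p.2)) 0
    (baseAns N M (buildSA (PySem.List.sorted (AB.map Prod.fst) (fun x => x))))
    hqs (fun q _ => Nat.zero_le _)
  rw [List.drop_zero] at hb
  rw [hb, loopA_eq_foldl_scoreF]
  haveI : RightCommutative
      (fun (ans : Int) (p : Int × Int) => max ans (scoreF N M
        (buildSA (PySem.List.sorted (AB.map Prod.fst) (fun x => x)))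
        (PySem.List.sorted (AB.map Prod.fst) (fun x => x)) p)) :=
    ⟨fun a p q => max_right_comm a _ _⟩
  exact (List.Perm.foldl_eq (PySem.List.sorted_perm AB (fun p => p.2) false) _).symm

-- ===== VERDICT (by name: the statement is the Claim_ definition above) =====
theorem solve_spec : Claim_equal_solve := by
  intro N M AB _ _
  unfold Spec_solve
  exact solve_eq_solve_alt N M AB
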